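-- pv_equiv track=rewrite | github.com/sehyunpark99/algorithms_public | graph/1857. Largest_Color_Value_in_a_directed_graph.py | largestPathValue
-- ===== SOURCE A (Python) =====
-- from typing import List
-- from collections import deque
--
-- def largestPathValue(colors: str, edges: List[List[int]]) -> int:
--     n = len(colors)
--     indegrees = [0] * n
--     graph = [[] for _ in range(n)]
--     for edge in edges:
--         graph[edge[0]].append(edge[1])
--         indegrees[edge[1]] += 1
--     zero_indegree = deque()
--     for i in range(n):
--         if indegrees[i] == 0:
--             zero_indegree.append(i)
--     counts = [[0]*26 for _ in range(n)]
--     for i in range(n):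
--         counts[i][ord(colors[i]) - ord('a')] += 1
--     max_count = 0
--     visited = 0
--     while zero_indegree:
--         u = zero_indegree.popleft()
--         visited += 1
--         for v in graph[u]:
--             for i in range(26):
--                 counts[v][i] = max(counts[v][i], counts[u][i] + (ord(colors[v]) - ord('a') == i))
--             indegrees[v] -= 1
--             if indegrees[v] == 0:
--                 zero_indegree.append(v)
--         max_count = max(max_count, max(counts[u]))
--     return max_count if visited == n else -1
-- ===== SOURCE B (Python) =====
-- def largestPathValue(colors, edges):
--     n = len(colors)
--     succ = [[] for _ in range(n)]
--     indeg = [0] * n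
--     for e in edges:
--         succ[e[0]].append(e[1])
--         indeg[e[1]] += 1
--     # phase 1: topological order by zero-indegree peeling (in-place queue with a head pointer)
--     order = [i for i in range(n) if indeg[i] == 0]
--     qi = 0
--     while qi < len(order):
--         u = order[qi]
--         qi += 1
--         for v in succ[u]:
--             indeg[v] -= 1
--             if indeg[v] == 0:
--                 order.append(v)
--     if len(order) < n:
--         return -1
--     # phase 2: pull-based DP over predecessors, in topological order
--     preds = [[] for _ in range(n)]
--     for e in edges:
--         preds[e[1]].append(e[0])
--     dp = [None] * n
--     best = 0
--     for u in order:
--         vec = [0] * 26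
--         for p in preds[u]:
--             pv = dp[p]
--             for i in range(26):
--                 if pv[i] > vec[i]:
--                     vec[i] = pv[i]
--         vec[ord(colors[u]) - 97] += 1
--         dp[u] = vec
--         best = max(best, max(vec))
--     return best
-- ===== Notes on version B (the rewrite author's own statement) =====
-- stated objective: alternative
-- what changed: A's fused Kahn BFS (which pushes 26-counter relaxations into every successor while dequeuing) is replaced by a two-phase algorithm: first peel a topological order with plain indegree bookkeeping, then one pull-based DP pass that builds each node's 26-vector from its predecessors' finished vectors.
-- outside the precondition, e.g. on largestPathValue('Ga', [[1, 0]]): A returns 1, B returns 2; on largestPathValue('Gb', [[0, 1]]): A returns 1, B returns 1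
import Mathlib
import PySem

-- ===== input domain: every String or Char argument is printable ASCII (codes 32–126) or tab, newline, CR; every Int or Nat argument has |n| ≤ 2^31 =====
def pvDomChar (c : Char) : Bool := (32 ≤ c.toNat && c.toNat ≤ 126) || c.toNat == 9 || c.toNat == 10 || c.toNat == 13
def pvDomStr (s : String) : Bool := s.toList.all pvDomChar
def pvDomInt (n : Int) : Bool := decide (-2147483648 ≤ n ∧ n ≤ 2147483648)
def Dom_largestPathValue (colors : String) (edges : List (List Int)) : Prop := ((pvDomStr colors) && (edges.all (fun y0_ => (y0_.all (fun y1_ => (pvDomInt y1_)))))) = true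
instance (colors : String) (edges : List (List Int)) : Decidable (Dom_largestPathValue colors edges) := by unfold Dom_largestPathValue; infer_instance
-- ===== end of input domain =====

-- B replaces A's fused Kahn BFS (relaxations pushed into successors while dequeuing) by a
-- two-phase algorithm: peel a topological order first, then one pull-based DP pass computing each
-- node's 26-vector from its predecessors' finished vectors; same asymptotic cost, different structure.

-- ===== PORT A =====
-- shared small helpers: ord(c) - ord('a'), and Python's max() on a (nonempty) int list
def lpvSlot (c : Char) : Nat := c.toNat - 97
-- Python list index with negative wraparound (exact for -n ≤ x < n, the range Pre_ admits)
def lpvIdx (n : Nat) (x : Int) : Nat := if x < 0 then (x + n).toNat else x.toNat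
def pyMaxRow (xs : List Int) : Int := (PySem.List.max? xs (fun x => x)).getD 0  -- rows always have 26 entries here

-- for i in range(26): counts[v][i] = max(counts[v][i], counts[u][i] + (ord(colors[v])-ord('a') == i))
def lpvRelax (urow row : List Int) (sv : Nat) : List Int :=
  (List.range 26).foldl
    (fun r i => r.set i (max (r.getD i 0) (urow.getD i 0 + (if sv = i then (1 : Int) else 0)))) row

-- the while-loop of A; state (queue, indegrees, counts, visited, max_count); fuel 2*n+1 is enough
-- because every node is appended to the queue at most twice over a run (its indegree only decreases,
-- so it hits 0 at most once after the initial scan)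
def lpvLoopA (cs : List Char) (graph : List (List Nat)) :
    Nat → List Nat → List Int → List (List Int) → Nat → Int → Nat × Int
  | 0, _, _, _, visited, maxc => (visited, maxc)
  | _ + 1, [], _, _, visited, maxc => (visited, maxc)
  | fuel + 1, u :: q, indeg, counts, visited, maxc =>
      let st := (graph.getD u []).foldl
        (fun (st : List Nat × List Int × List (List Int)) v =>
          let counts' := st.2.2.set v (lpvRelax (st.2.2.getD u []) (st.2.2.getD v []) (lpvSlot (cs.getD v 'a')))
          let dv := st.2.1.getD v 0 - 1
          (if dv = 0 then st.1 ++ [v] else st.1, st.2.1.set v dv, counts'))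
        (q, indeg, counts)
      lpvLoopA cs graph fuel st.1 st.2.1 st.2.2 (visited + 1)
        (max maxc (pyMaxRow (st.2.2.getD u [])))

-- edge indices go through lpvIdx (Python's wraparound); under Pre_ they land in [0, n)
def largestPathValue (colors : String) (edges : List (List Int)) : Int :=
  let cs := colors.toList
  let n := cs.length
  let gi := edges.foldl
    (fun (st : List (List Nat) × List Int) e =>
      (st.1.set (lpvIdx n (e.getD 0 0)) ((st.1.getD (lpvIdx n (e.getD 0 0)) []) ++ [lpvIdx n (e.getD 1 0)]),
       st.2.set (lpvIdx n (e.getD 1 0)) ((st.2.getD (lpvIdx n (e.getD 1 0)) 0) + 1)))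
    (List.replicate n [], List.replicate n 0)
  let zero_indegree := (List.range n).filter (fun i => gi.2.getD i 0 == 0)
  let counts := (List.range n).foldl
    (fun cts i => cts.set i ((cts.getD i []).set (lpvSlot (cs.getD i 'a'))
        (((cts.getD i []).getD (lpvSlot (cs.getD i 'a')) 0) + 1)))
    (List.replicate n (List.replicate 26 0))
  let r := lpvLoopA cs gi.1 (2 * n + 1) zero_indegree gi.2 counts 0 0
  if r.1 = n then r.2 else -1

-- ===== PORT B =====
-- phase-1 while-loop of B: order with a head pointer qi; same fuel bound as A's loop
def lpvPeelB (graph : List (List Nat)) :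
    Nat → List Nat → Nat → List Int → List Nat
  | 0, order, _, _ => order
  | fuel + 1, order, qi, indeg =>
      if qi < order.length then
        let u := order.getD qi 0
        let st := (graph.getD u []).foldl
          (fun (st : List Nat × List Int) v =>
            let dv := st.2.getD v 0 - 1
            (if dv = 0 then st.1 ++ [v] else st.1, st.2.set v dv))
          (order, indeg)
        lpvPeelB graph fuel st.1 (qi + 1) st.2
      else order

-- vec = max over predecessors' dp vectors, then +1 at this node's colour slot
def lpvVec (cs : List Char) (dp : List (List Int)) (preds : List Nat) (u : Nat) : List Int :=
  let vec := preds.foldl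
    (fun vec p =>
      (List.range 26).foldl
        (fun r i => if (dp.getD p []).getD i 0 > r.getD i 0 then r.set i ((dp.getD p []).getD i 0) else r)
        vec)
    (List.replicate 26 0)
  let s := lpvSlot (cs.getD u 'a')
  vec.set s (vec.getD s 0 + 1)

def lpvPhase2Step (cs : List Char) (predsG : List (List Nat))
    (st : List (List Int) × Int) (u : Nat) : List (List Int) × Int :=
  let vec := lpvVec cs st.1 (predsG.getD u []) u
  (st.1.set u vec, max st.2 (pyMaxRow vec))

def largestPathValue_alt (colors : String) (edges : List (List Int)) : Int :=
  let cs := colors.toList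
  let n := cs.length
  let gi := edges.foldl
    (fun (st : List (List Nat) × List Int) e =>
      (st.1.set (lpvIdx n (e.getD 0 0)) ((st.1.getD (lpvIdx n (e.getD 0 0)) []) ++ [lpvIdx n (e.getD 1 0)]),
       st.2.set (lpvIdx n (e.getD 1 0)) ((st.2.getD (lpvIdx n (e.getD 1 0)) 0) + 1)))
    (List.replicate n [], List.replicate n 0)
  let order0 := (List.range n).filter (fun i => gi.2.getD i 0 == 0)
  let order := lpvPeelB gi.1 (2 * n + 1) order0 0 gi.2
  if order.length < n then -1
  else
    let predsG := edges.foldl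
      (fun (pg : List (List Nat)) e =>
        pg.set (lpvIdx n (e.getD 1 0)) ((pg.getD (lpvIdx n (e.getD 1 0)) []) ++ [lpvIdx n (e.getD 0 0)]))
      (List.replicate n [])
    (order.foldl (lpvPhase2Step cs predsG) (List.replicate n [], 0)).2

-- ===== PRECONDITION & SPEC =====
-- Pre_ requires lowercase colours and edge rows of length ≥ 2 with endpoints in [-n, n) (Python's
-- index wraparound, which both programs share); outside it A either raises IndexError or — on
-- non-lowercase colours — returns values made accidental by `counts[i][ord(c)-97]` wrapping to an
-- unrelated colour slot, where A and B legitimately differ.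
def Pre_largestPathValue (colors : String) (edges : List (List Int)) : Prop :=
  (colors.toList.all (fun c => decide (97 ≤ c.toNat) && decide (c.toNat ≤ 122))) = true ∧
  (edges.all (fun e => decide (2 ≤ e.length) &&
    decide (-(colors.toList.length : Int) ≤ e.getD 0 0) && decide (e.getD 0 0 < (colors.toList.length : Int)) &&
    decide (-(colors.toList.length : Int) ≤ e.getD 1 0) && decide (e.getD 1 0 < (colors.toList.length : Int)))) = true
instance (colors : String) (edges : List (List Int)) : Decidable (Pre_largestPathValue colors edges) := by
  unfold Pre_largestPathValue; infer_instance

def pvWitness_largestPathValue : String × List (List Int) := ("aab", [[0, 1], [1, 2], [0, 2]])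

def Spec_largestPathValue (colors : String) (edges : List (List Int)) (out : Int) : Prop :=
  out = largestPathValue_alt colors edges
instance (colors : String) (edges : List (List Int)) (out : Int) : Decidable (Spec_largestPathValue colors edges out) := by
  unfold Spec_largestPathValue; infer_instance

-- ===== CLAIM (what is proved, stated in full; the proofs are below) =====
def Claim_equal_largestPathValue : Prop :=
  ∀ (colors : String) (edges : List (List Int)), Dom_largestPathValue colors edges →
    Pre_largestPathValue colors edges →
    Spec_largestPathValue colors edges (largestPathValue colors edges)

-- ===== LEMMAS AND PROOFS =====

-- edges as (source, target) pairs, exactly as both ports read them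
def esOf (n : Nat) (edges : List (List Int)) : List (Nat × Nat) :=
  edges.map (fun e => (lpvIdx n (e.getD 0 0), lpvIdx n (e.getD 1 0)))
def predsE (es : List (Nat × Nat)) (v : Nat) : List (Nat × Nat) := es.filter (fun e => e.2 == v)
def tgtsE (es : List (Nat × Nat)) (u : Nat) : List Nat := (es.filter (fun e => e.1 == u)).map (·.2)
def predsLst (es : List (Nat × Nat)) (v : Nat) : List Nat := (predsE es v).map (·.1)
def donePredsL (es : List (Nat × Nat)) (done : List Nat) (v : Nat) : List Nat :=
  ((predsE es v).filter (fun e => decide (e.1 ∈ done))).map (·.1)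
def dpF (cs : List Char) (pg : List (List Nat)) (done : List Nat) : List (List Int) × Int :=
  done.foldl (lpvPhase2Step cs pg) (List.replicate cs.length [], 0)
def dpAt (cs : List Char) (pg : List (List Nat)) (done : List Nat) (p : Nat) : List Int :=
  (dpF cs pg done).1.getD p []
def bestAt (cs : List Char) (pg : List (List Nat)) (done : List Nat) : Int := (dpF cs pg done).2
def oneHot (s i : Nat) : Int := if s = i then 1 else 0
def fmax0 (l : List Int) : Int := l.foldl max 0
def pendCnt (cs : List Char) (es : List (Nat × Nat)) (pg : List (List Nat))
    (done : List Nat) (v i : Nat) : Int :=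
  oneHot (lpvSlot (cs.getD v 'a')) i
    + fmax0 ((donePredsL es done v).map (fun p => (dpAt cs pg done p).getD i 0))

-- the loop bodies of the two ports, as named step functions (definitionally the ports' lambdas)
def stepA (cs : List Char) (u : Nat) (st : List Nat × List Int × List (List Int)) (v : Nat) :
    List Nat × List Int × List (List Int) :=
  let counts' := st.2.2.set v (lpvRelax (st.2.2.getD u []) (st.2.2.getD v []) (lpvSlot (cs.getD v 'a')))
  let dv := st.2.1.getD v 0 - 1
  (if dv = 0 then st.1 ++ [v] else st.1, st.2.1.set v dv, counts')
def stepB (st : List Nat × List Int) (v : Nat) : List Nat × List Int :=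
  let dv := st.2.getD v 0 - 1
  (if dv = 0 then st.1 ++ [v] else st.1, st.2.set v dv)

-- generic: fold over range mm where step i touches only index i, reading it
theorem foldl_idx {α : Type} (dflt : α) (step : List α → Nat → List α) (f : Nat → α → α)
    (hlen : ∀ r i, (step r i).length = r.length)
    (hval : ∀ (r : List α) i j, j < r.length →
      (step r i).getD j dflt = if j = i then f i (r.getD j dflt) else r.getD j dflt) :
    ∀ (mm : Nat) (r : List α), mm ≤ r.length →
      ((List.range mm).foldl step r).length = r.length ∧
      ∀ j, ((List.range mm).foldl step r).getD j dflt
        = if j < mm then f j (r.getD j dflt) else r.getD j dflt := by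
  intro mm
  induction mm with
  | zero => intro r _; simp
  | succ m ih =>
    intro r hr
    obtain ⟨hL, hV⟩ := ih r (by omega)
    rw [List.range_succ, List.foldl_append]
    simp only [List.foldl_cons, List.foldl_nil]
    refine ⟨by rw [hlen, hL], ?_⟩
    intro j
    by_cases hj : j < r.length
    · have hj' : j < (List.foldl step r (List.range m)).length := by rw [hL]; exact hj
      rw [hval _ m j hj']
      by_cases hjm : j = m
      · subst hjm
        rw [if_pos rfl, hV j, if_neg (by omega), if_pos (by omega)]
      · rw [if_neg hjm, hV j]
        by_cases h2 : j < m
        · rw [if_pos h2, if_pos (by omega)]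
        · rw [if_neg h2, if_neg (by omega)]
    · have h1 : (step (List.foldl step r (List.range m)) m).length ≤ j := by rw [hlen, hL]; omega
      rw [List.getD_eq_default _ _ h1, List.getD_eq_default _ _ (by omega)]
      rw [if_neg (by omega)]

theorem relax_spec (urow row : List Int) (sv : Nat) (h : row.length = 26) :
    (lpvRelax urow row sv).length = 26 ∧
    ∀ i, (lpvRelax urow row sv).getD i 0
      = if i < 26 then max (row.getD i 0) (urow.getD i 0 + oneHot sv i) else 0 := by
  have base := foldl_idx (0 : Int)
    (fun r i => r.set i (max (r.getD i 0) (urow.getD i 0 + (if sv = i then (1 : Int) else 0))))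
    (fun i x => max x (urow.getD i 0 + oneHot sv i))
    (fun r i => by simp)
    (fun r i j hj => by
      by_cases hji : j = i
      · subst hji
        rw [if_pos rfl]
        simp [List.getD_eq_getElem?_getD, hj, oneHot]
      · rw [if_neg hji]
        simp [List.getD_eq_getElem?_getD, List.getElem?_set_ne (fun hh => hji hh.symm)])
    26 row (by omega)
  obtain ⟨hL, hV⟩ := base
  refine ⟨by rw [lpvRelax, hL, h], ?_⟩
  intro i
  rw [lpvRelax, hV i]
  by_cases hi : i < 26
  · rw [if_pos hi, if_pos hi]
  · rw [if_neg hi, if_neg hi, List.getD_eq_default _ _ (by omega)]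

theorem relax_idem (urow row : List Int) (sv : Nat) (h : row.length = 26) :
    lpvRelax urow (lpvRelax urow row sv) sv = lpvRelax urow row sv := by
  obtain ⟨L1, V1⟩ := relax_spec urow row sv h
  obtain ⟨L2, V2⟩ := relax_spec urow _ sv L1
  apply List.ext_getElem (by rw [L2, L1])
  intro i h1 h2
  have hi : i < 26 := by rw [L2] at h1; exact h1
  rw [← List.getD_eq_getElem _ 0 h1, ← List.getD_eq_getElem _ 0 h2, V2 i, V1 i,
    if_pos hi, if_pos hi, max_assoc, max_self]

theorem vec_spec (cs : List Char) (dp : List (List Int)) (preds : List Nat) (u : Nat) :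
    (lpvVec cs dp preds u).length = 26 ∧
    ∀ i, i < 26 → (lpvVec cs dp preds u).getD i 0
      = oneHot (lpvSlot (cs.getD u 'a')) i
        + fmax0 (preds.map (fun p => (dp.getD p []).getD i 0)) := by
  have acc : ∀ (ps : List Nat) (vec : List Int), vec.length = 26 →
      ((ps.foldl (fun vec p =>
        (List.range 26).foldl
          (fun r i => if (dp.getD p []).getD i 0 > r.getD i 0 then r.set i ((dp.getD p []).getD i 0) else r)
          vec) vec).length = 26) ∧
      ∀ i, i < 26 →
        (ps.foldl (fun vec p =>
          (List.range 26).foldl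
            (fun r i => if (dp.getD p []).getD i 0 > r.getD i 0 then r.set i ((dp.getD p []).getD i 0) else r)
            vec) vec).getD i 0
          = (ps.map (fun p => (dp.getD p []).getD i 0)).foldl max (vec.getD i 0) := by
    intro ps
    induction ps with
    | nil => intro vec hv; exact ⟨hv, fun i _ => rfl⟩
    | cons p t ih =>
      intro vec hv
      have one := foldl_idx (0 : Int)
        (fun r i => if (dp.getD p []).getD i 0 > r.getD i 0 then r.set i ((dp.getD p []).getD i 0) else r)
        (fun i x => max x ((dp.getD p []).getD i 0))
        (fun r i => by dsimp only; split <;> simp)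
        (fun r i j hj => by
          dsimp only
          by_cases hc : (dp.getD p []).getD i 0 > r.getD i 0
          · rw [if_pos hc]
            by_cases hji : j = i
            · subst hji
              rw [if_pos rfl]
              have hset : (r.set j ((dp.getD p []).getD j 0)).getD j 0 = (dp.getD p []).getD j 0 := by
                simp [List.getD_eq_getElem?_getD, hj]
              rw [hset]
              omega
            · rw [if_neg hji]
              simp [List.getD_eq_getElem?_getD, List.getElem?_set_ne (fun hh => hji hh.symm)]
          · rw [if_neg hc]
            by_cases hji : j = i
            · subst hji; rw [if_pos rfl]; omega
            · rw [if_neg hji])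
        26 vec (by omega)
      obtain ⟨L1, V1⟩ := one
      obtain ⟨L2, V2⟩ := ih _ (L1.trans hv)
      refine ⟨by simpa using L2, ?_⟩
      intro i hi
      simp only [List.foldl_cons, List.map_cons]
      rw [V2 i hi, V1 i, if_pos hi]
  obtain ⟨La, Va⟩ := acc preds (List.replicate 26 0) (by simp)
  have hrep : ∀ j, (List.replicate 26 (0:Int)).getD j 0 = 0 := by
    intro j
    rw [List.getD_eq_getElem?_getD, List.getElem?_replicate]
    split <;> rfl
  constructor
  · rw [lpvVec]
    simpa using La
  · intro i hi
    rw [lpvVec]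
    by_cases his : i = lpvSlot (cs.getD u 'a')
    · subst his
      rw [List.getD_eq_getElem?_getD]
      rw [List.getElem?_set_self (by rw [La]; exact hi)]
      simp only [Option.getD_some]
      rw [Va _ hi, hrep, oneHot, if_pos rfl]
      simp only [fmax0]
      omega
    · rw [List.getD_eq_getElem?_getD, List.getElem?_set_ne (fun hh => his hh.symm),
        ← List.getD_eq_getElem?_getD, Va i hi, hrep, oneHot, if_neg (fun hh => his hh.symm)]
      simp only [fmax0]
      omega

theorem le_fmax (a : Int) (l : List Int) : a ≤ l.foldl max a := by
  induction l generalizing a with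
  | nil => simp
  | cons x t ih => exact le_trans (le_max_left a x) (ih (max a x))

theorem fmax_start (l : List Int) (a b : Int) :
    l.foldl max (max a b) = max (l.foldl max a) b := by
  induction l generalizing a with
  | nil => rfl
  | cons x t ih =>
    simp only [List.foldl_cons]
    rw [max_right_comm a b x, ih (max a x)]

theorem fmax_or {α : Type} (P Q : α → Bool) (f : α → Int) (cst : Int) :
    ∀ (l : List α) (a : Int), (∀ x ∈ l, Q x = true → f x = cst) → (∃ x ∈ l, Q x = true) →
      (((l.filter (fun x => P x || Q x)).map f).foldl max a)
        = max (((l.filter P).map f).foldl max a) cst := by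
  intro l
  induction l with
  | nil => intro a _ hex; simp at hex
  | cons x t ih =>
    intro a hQ hex
    have hQt : ∀ y ∈ t, Q y = true → f y = cst := fun y hy => hQ y (List.mem_cons_of_mem x hy)
    by_cases hQx : Q x = true
    · have hfx : f x = cst := hQ x List.mem_cons_self hQx
      by_cases hex' : ∃ y ∈ t, Q y = true
      · by_cases hPx : P x = true
        · simp only [List.filter_cons, hPx, hQx, Bool.or_true, Bool.true_or, if_pos,
            List.map_cons, List.foldl_cons]
          exact ih (max a (f x)) hQt hex'
        · simp only [List.filter_cons, hPx, hQx, Bool.false_or, if_pos, if_neg,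
            List.map_cons, List.foldl_cons, Bool.false_eq_true, ite_false, ite_true]
          rw [ih (max a (f x)) hQt hex', hfx, fmax_start, max_assoc, max_self]
      · have hfilter : t.filter (fun y => P y || Q y) = t.filter P := by
          apply List.filter_congr
          intro y hy
          rcases hqy : Q y with _ | _
          · simp
          · exact absurd ⟨y, hy, hqy⟩ hex'
        by_cases hPx : P x = true
        · simp only [List.filter_cons, hPx, hQx, Bool.true_or, if_pos, ite_true,
            List.map_cons, List.foldl_cons, hfilter]
          have hge : cst ≤ List.foldl max (max a (f x)) (List.map f (t.filter P)) :=
            le_trans (by rw [hfx]; exact le_max_right a cst) (le_fmax _ _)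
          rw [max_eq_left hge]
        · simp only [List.filter_cons, hPx, hQx, Bool.false_or, Bool.false_eq_true,
            ite_false, ite_true, List.map_cons, List.foldl_cons, hfilter]
          rw [hfx, fmax_start]
    · have hex' : ∃ y ∈ t, Q y = true := by
        rcases hex with ⟨y, hy, hQy⟩
        rcases List.mem_cons.mp hy with rfl | hy'
        · exact absurd hQy hQx
        · exact ⟨y, hy', hQy⟩
      by_cases hPx : P x = true
      · simp only [List.filter_cons, hPx, hQx, Bool.true_or, if_pos, ite_true,
          List.map_cons, List.foldl_cons]
        exact ih (max a (f x)) hQt hex'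
      · simp only [List.filter_cons, hPx, hQx, Bool.false_or, Bool.false_eq_true,
          ite_false]
        exact ih a hQt hex'

theorem countP_or_disjoint {α : Type} (P Q : α → Bool) :
    ∀ (l : List α), (∀ x ∈ l, ¬(P x = true ∧ Q x = true)) →
      l.countP (fun x => P x || Q x) = l.countP P + l.countP Q := by
  intro l
  induction l with
  | nil => intro _; simp
  | cons x t ih =>
    intro h
    have ht := ih (fun y hy => h y (List.mem_cons_of_mem x hy))
    have hx := h x List.mem_cons_self
    simp only [List.countP_cons, ht]
    rcases hp : P x with _ | _ <;> rcases hq : Q x with _ | _ <;> simp [hp, hq] at hx ⊢ <;> omega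

theorem nodup_lt_length_le (l : List Nat) (n : Nat) (hnd : l.Nodup) (hb : ∀ v ∈ l, v < n) :
    l.length ≤ n := by
  classical
  rw [← List.toFinset_card_of_nodup hnd]
  have hsub : l.toFinset ⊆ Finset.range n := by
    intro x hx
    rw [Finset.mem_range]
    exact hb x (List.mem_toFinset.mp hx)
  simpa using Finset.card_le_card hsub

-- append-building fold (used for graph/succ and preds)
theorem build_append_spec {α : Type} (sel : Nat × Nat → Nat) (val : Nat × Nat → α) :
    ∀ (es : List (Nat × Nat)) (g : List (List α)), (∀ e ∈ es, sel e < g.length) →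
      (es.foldl (fun g e => g.set (sel e) ((g.getD (sel e) []) ++ [val e])) g).length = g.length ∧
      ∀ u, (es.foldl (fun g e => g.set (sel e) ((g.getD (sel e) []) ++ [val e])) g).getD u []
        = g.getD u [] ++ ((es.filter (fun e => sel e == u)).map val) := by
  intro es
  induction es with
  | nil => intro g _; simp
  | cons e es ih =>
    intro g hg
    have he : sel e < g.length := hg e List.mem_cons_self
    have hg' : ∀ x ∈ es, sel x < (g.set (sel e) ((g.getD (sel e) []) ++ [val e])).length := by
      intro x hx
      rw [List.length_set]
      exact hg x (List.mem_cons_of_mem e hx)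
    obtain ⟨ihL, ihV⟩ := ih _ hg'
    constructor
    · simp only [List.foldl_cons]
      rw [ihL, List.length_set]
    · intro u
      simp only [List.foldl_cons]
      rw [ihV u]
      by_cases hu : sel e = u
      · subst hu
        have h1 : (g.set (sel e) ((g.getD (sel e) []) ++ [val e])).getD (sel e) []
            = g.getD (sel e) [] ++ [val e] := by
          simp [List.getD_eq_getElem?_getD, he]
        rw [h1]
        simp only [List.filter_cons, BEq.rfl, Bool.true_or, if_pos, ite_true, List.map_cons]
        simp
      · have h1 : (g.set (sel e) ((g.getD (sel e) []) ++ [val e])).getD u []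
            = g.getD u [] := by
          rw [List.getD_eq_getElem?_getD, List.getElem?_set_ne hu, ← List.getD_eq_getElem?_getD]
        rw [h1]
        simp only [List.filter_cons]
        have : (sel e == u) = false := by simp [hu]
        rw [this]
        simp

-- counting fold (indegrees)
theorem build_count_spec :
    ∀ (es : List (Nat × Nat)) (g : List Int), (∀ e ∈ es, e.2 < g.length) →
      (es.foldl (fun g e => g.set e.2 ((g.getD e.2 0) + 1)) g).length = g.length ∧
      ∀ v, (es.foldl (fun g e => g.set e.2 ((g.getD e.2 0) + 1)) g).getD v 0
        = g.getD v 0 + ((predsE es v).length : Int) := by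
  intro es
  induction es with
  | nil => intro g _; simp [predsE]
  | cons e es ih =>
    intro g hg
    have he : e.2 < g.length := hg e List.mem_cons_self
    have hg' : ∀ x ∈ es, x.2 < (g.set e.2 ((g.getD e.2 0) + 1)).length := by
      intro x hx
      rw [List.length_set]
      exact hg x (List.mem_cons_of_mem e hx)
    obtain ⟨ihL, ihV⟩ := ih _ hg'
    constructor
    · simp only [List.foldl_cons]
      rw [ihL, List.length_set]
    · intro v
      simp only [List.foldl_cons]
      rw [ihV v]
      by_cases hv : e.2 = v
      · subst hv
        have h1 : (g.set e.2 ((g.getD e.2 0) + 1)).getD e.2 0 = g.getD e.2 0 + 1 := by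
          simp [List.getD_eq_getElem?_getD, he]
        rw [h1]
        simp only [predsE, List.filter_cons, BEq.rfl, ite_true, List.length_cons]
        push_cast
        ring
      · have h1 : (g.set e.2 ((g.getD e.2 0) + 1)).getD v 0 = g.getD v 0 := by
          rw [List.getD_eq_getElem?_getD, List.getElem?_set_ne hv, ← List.getD_eq_getElem?_getD]
        rw [h1]
        simp only [predsE, List.filter_cons]
        have : (e.2 == v) = false := by simp [hv]
        rw [this]
        simp

theorem dpF_append (cs : List Char) (pg : List (List Nat)) (done : List Nat) (u : Nat) :
    dpF cs pg (done ++ [u]) = lpvPhase2Step cs pg (dpF cs pg done) u := by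
  rw [dpF, dpF, List.foldl_append]
  rfl

theorem dpF_len (cs : List Char) (pg : List (List Nat)) :
    ∀ (done : List Nat), (dpF cs pg done).1.length = cs.length := by
  have gen : ∀ (done : List Nat) (st : List (List Int) × Int), st.1.length = cs.length →
      (done.foldl (lpvPhase2Step cs pg) st).1.length = cs.length := by
    intro done
    induction done with
    | nil => intro st h; exact h
    | cons x t ih =>
      intro st h
      exact ih _ (by simp [lpvPhase2Step, h])
  intro done
  exact gen done _ (by simp)

theorem dpAt_append_ne (cs : List Char) (pg : List (List Nat)) (done : List Nat) (u p : Nat)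
    (h : p ≠ u) : dpAt cs pg (done ++ [u]) p = dpAt cs pg done p := by
  rw [dpAt, dpAt, dpF_append, lpvPhase2Step]
  simp only []
  rw [List.getD_eq_getElem?_getD, List.getElem?_set_ne (fun hh => h hh.symm),
    ← List.getD_eq_getElem?_getD]

theorem dpAt_append_self (cs : List Char) (pg : List (List Nat)) (done : List Nat) (u : Nat)
    (hu : u < cs.length) :
    dpAt cs pg (done ++ [u]) u = lpvVec cs (dpF cs pg done).1 (pg.getD u []) u := by
  rw [dpAt, dpF_append, lpvPhase2Step]
  simp only []
  rw [List.getD_eq_getElem?_getD, List.getElem?_set_self (by rw [dpF_len]; exact hu), Option.getD_some]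

theorem bestAt_append (cs : List Char) (pg : List (List Nat)) (done : List Nat) (u : Nat) :
    bestAt cs pg (done ++ [u])
      = max (bestAt cs pg done) (pyMaxRow (lpvVec cs (dpF cs pg done).1 (pg.getD u []) u)) := by
  rw [bestAt, dpF_append]
  rfl

theorem loopA_cons (cs : List Char) (graph : List (List Nat)) (fuel : Nat) (u : Nat)
    (q : List Nat) (d : List Int) (c : List (List Int)) (vis : Nat) (m : Int) :
    lpvLoopA cs graph (fuel + 1) (u :: q) d c vis m
      = lpvLoopA cs graph fuel ((graph.getD u []).foldl (stepA cs u) (q, d, c)).1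
          ((graph.getD u []).foldl (stepA cs u) (q, d, c)).2.1
          ((graph.getD u []).foldl (stepA cs u) (q, d, c)).2.2 (vis + 1)
          (max m (pyMaxRow (((graph.getD u []).foldl (stepA cs u) (q, d, c)).2.2.getD u []))) := rfl

theorem peelB_succ (graph : List (List Nat)) (fuel : Nat) (ord : List Nat) (qi : Nat)
    (d : List Int) (h : qi < ord.length) :
    lpvPeelB graph (fuel + 1) ord qi d
      = lpvPeelB graph fuel ((graph.getD (ord.getD qi 0) []).foldl stepB (ord, d)).1 (qi + 1)
          ((graph.getD (ord.getD qi 0) []).foldl stepB (ord, d)).2 := by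
  rw [lpvPeelB, if_pos h]
  rfl

theorem peelB_stop (graph : List (List Nat)) (fuel : Nat) (ord : List Nat) (qi : Nat)
    (d : List Int) (h : ¬ qi < ord.length) :
    lpvPeelB graph (fuel + 1) ord qi d = ord := by
  rw [lpvPeelB, if_neg h]

theorem innerB_proj (cs : List Char) (u : Nat) :
    ∀ (L : List Nat) (q : List Nat) (d : List Int) (c : List (List Int)) (pref : List Nat),
      (L.foldl stepB (pref ++ q, d)).1 = pref ++ (L.foldl (stepA cs u) (q, d, c)).1 ∧
      (L.foldl stepB (pref ++ q, d)).2 = (L.foldl (stepA cs u) (q, d, c)).2.1 := by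
  intro L
  induction L with
  | nil => intro q d c pref; exact ⟨rfl, rfl⟩
  | cons v t ih =>
    intro q d c pref
    simp only [List.foldl_cons]
    have hB : stepB (pref ++ q, d) v
        = (pref ++ (if d.getD v 0 - 1 = 0 then q ++ [v] else q), d.set v (d.getD v 0 - 1)) := by
      rw [stepB]
      dsimp only
      by_cases hz : d.getD v 0 - 1 = 0
      · rw [if_pos hz, if_pos hz, List.append_assoc]
      · rw [if_neg hz, if_neg hz]
    have hA : stepA cs u (q, d, c) v
        = ((if d.getD v 0 - 1 = 0 then q ++ [v] else q), d.set v (d.getD v 0 - 1),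
           c.set v (lpvRelax (c.getD u []) (c.getD v []) (lpvSlot (cs.getD v 'a')))) := rfl
    rw [hB, hA]
    exact ih _ _ _ pref

theorem innerA_indeg (cs : List Char) (u : Nat) :
    ∀ (L : List Nat) (q : List Nat) (d : List Int) (c : List (List Int)),
      ((L.foldl (stepA cs u) (q, d, c)).2.1.length = d.length) ∧
      ∀ v, v < d.length → (L.foldl (stepA cs u) (q, d, c)).2.1.getD v 0 = d.getD v 0 - L.count v := by
  intro L
  induction L with
  | nil => intro q d c; simp
  | cons v0 t ih =>
    intro q d c
    simp only [List.foldl_cons]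
    have hA : stepA cs u (q, d, c) v0
        = ((if d.getD v0 0 - 1 = 0 then q ++ [v0] else q), d.set v0 (d.getD v0 0 - 1),
           c.set v0 (lpvRelax (c.getD u []) (c.getD v0 []) (lpvSlot (cs.getD v0 'a')))) := rfl
    rw [hA]
    obtain ⟨ihL, ihV⟩ := ih (if d.getD v0 0 - 1 = 0 then q ++ [v0] else q)
      (d.set v0 (d.getD v0 0 - 1))
      (c.set v0 (lpvRelax (c.getD u []) (c.getD v0 []) (lpvSlot (cs.getD v0 'a'))))
    rw [List.length_set] at ihL
    refine ⟨ihL, ?_⟩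
    intro v hvlt
    rw [ihV v (by rw [List.length_set]; exact hvlt)]
    by_cases hv : v = v0
    · subst hv
      have : (d.set v (d.getD v 0 - 1)).getD v 0 = d.getD v 0 - 1 := by
        simp [List.getD_eq_getElem?_getD, hvlt]
      rw [this, List.count_cons]
      simp
      omega
    · have : (d.set v0 (d.getD v0 0 - 1)).getD v 0 = d.getD v 0 := by
        rw [List.getD_eq_getElem?_getD, List.getElem?_set_ne (fun hh => hv hh.symm),
          ← List.getD_eq_getElem?_getD]
      rw [this, List.count_cons]
      simp [hv]
      omega


set_option maxHeartbeats 1000000 in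
theorem innerA_counts (cs : List Char) (u : Nat) :
    ∀ (L : List Nat) (q : List Nat) (d : List Int) (c : List (List Int)),
      u ∉ L → (∀ w ∈ L, (c.getD w []).length = 26) →
      ((L.foldl (stepA cs u) (q, d, c)).2.2.length = c.length) ∧
      ∀ w, (L.foldl (stepA cs u) (q, d, c)).2.2.getD w []
        = if w ∈ L then lpvRelax (c.getD u []) (c.getD w []) (lpvSlot (cs.getD w 'a'))
          else c.getD w [] := by
  intro L
  induction L with
  | nil => intro q d c _ _; simp
  | cons v0 t ih =>
    intro q d c hu hrows
    simp only [List.foldl_cons]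
    have hA : stepA cs u (q, d, c) v0
        = ((if d.getD v0 0 - 1 = 0 then q ++ [v0] else q), d.set v0 (d.getD v0 0 - 1),
           (c.set v0 (lpvRelax (c.getD u []) (c.getD v0 []) (lpvSlot (cs.getD v0 'a'))))) := rfl
    rw [hA]
    have huv0 : u ≠ v0 := fun hh => hu (hh ▸ List.mem_cons_self)
    have hut : u ∉ t := fun hh => hu (List.mem_cons_of_mem v0 hh)
    have hc1u : (c.set v0 (lpvRelax (c.getD u []) (c.getD v0 []) (lpvSlot (cs.getD v0 'a')))).getD u [] = c.getD u [] := by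
      rw [List.getD_eq_getElem?_getD, List.getElem?_set_ne (fun hh => huv0 hh.symm),
        ← List.getD_eq_getElem?_getD]
    have hc1w : ∀ w, w ≠ v0 → (c.set v0 (lpvRelax (c.getD u []) (c.getD v0 []) (lpvSlot (cs.getD v0 'a')))).getD w [] = c.getD w [] := by
      intro w hw
      rw [List.getD_eq_getElem?_getD, List.getElem?_set_ne (fun hh => hw hh.symm),
        ← List.getD_eq_getElem?_getD]
    have hrow0 : (c.getD v0 []).length = 26 := hrows v0 List.mem_cons_self
    have hc1v0 : (c.set v0 (lpvRelax (c.getD u []) (c.getD v0 []) (lpvSlot (cs.getD v0 'a')))).getD v0 [] = lpvRelax (c.getD u []) (c.getD v0 []) (lpvSlot (cs.getD v0 'a')) ∨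
        (c.set v0 (lpvRelax (c.getD u []) (c.getD v0 []) (lpvSlot (cs.getD v0 'a')))).getD v0 [] = c.getD v0 [] := by
      rcases lt_or_ge v0 c.length with hvl | hvl
      · left
        rw [List.getD_eq_getElem?_getD, List.getElem?_set_self hvl, Option.getD_some]
      · right
        rw [List.getD_eq_default _ _ (by rw [List.length_set]; omega),
          List.getD_eq_default _ _ (by omega)]
    have hrows1 : ∀ w ∈ t, ((c.set v0 (lpvRelax (c.getD u []) (c.getD v0 []) (lpvSlot (cs.getD v0 'a')))).getD w []).length = 26 := by
      intro w hw
      by_cases hwv : w = v0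
      · subst hwv
        rcases hc1v0 with h | h
        · rw [h]; exact (relax_spec _ _ _ hrow0).1
        · rw [h]; exact hrow0
      · rw [hc1w w hwv]; exact hrows w (List.mem_cons_of_mem v0 hw)
    obtain ⟨ihL, ihV⟩ := ih (if d.getD v0 0 - 1 = 0 then q ++ [v0] else q)
      (d.set v0 (d.getD v0 0 - 1)) (c.set v0 (lpvRelax (c.getD u []) (c.getD v0 []) (lpvSlot (cs.getD v0 'a')))) hut hrows1
    rw [List.length_set] at ihL
    refine ⟨ihL, ?_⟩
    intro w
    rw [ihV w]
    by_cases hwt : w ∈ t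
    · rw [if_pos hwt, if_pos (List.mem_cons_of_mem v0 hwt), hc1u]
      by_cases hwv : w = v0
      · subst hwv
        rcases hc1v0 with h | h
        · rw [h, relax_idem _ _ _ hrow0]
        · rw [h]
      · rw [hc1w w hwv]
    · rw [if_neg hwt]
      by_cases hwv : w = v0
      · subst hwv
        rw [if_pos List.mem_cons_self]
        rcases lt_or_ge w c.length with hvl | hvl
        · rw [List.getD_eq_getElem?_getD, List.getElem?_set_self hvl, Option.getD_some]
        · rw [List.getD_eq_default _ _ (by rw [List.length_set]; omega)]
          have h2 : c.getD w [] = [] := List.getD_eq_default _ _ (by omega)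
          rw [h2] at hrow0
          simp at hrow0
      · rw [hc1w w hwv, if_neg (by simp [hwv, hwt])]

theorem count_tgts (es : List (Nat × Nat)) (u v : Nat) :
    (tgtsE es u).count v = ((predsE es v).filter (fun e => e.1 == u)).length := by
  induction es with
  | nil => simp [tgtsE, predsE]
  | cons e t ih =>
    rcases h1 : (e.1 == u) with _ | _ <;> rcases h2 : (e.2 == v) with _ | _ <;>
      simp only [tgtsE, predsE, List.filter_cons, h1, h2, ite_true, ite_false,
        List.map_cons, List.count_cons] <;>
      simp only [tgtsE, predsE] at ih <;>
      simp [ih, h1, h2, List.count_cons]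

theorem donePreds_append_len (es : List (Nat × Nat)) (done : List Nat) (u v : Nat)
    (hud : u ∉ done) :
    (donePredsL es (done ++ [u]) v).length
      = (donePredsL es done v).length + ((predsE es v).filter (fun e => e.1 == u)).length := by
  rw [donePredsL, donePredsL]
  simp only [List.length_map, ← List.countP_eq_length_filter]
  have hcong : (predsE es v).countP (fun e => decide (e.1 ∈ done ++ [u]))
      = (predsE es v).countP (fun e => decide (e.1 ∈ done) || (e.1 == u)) := by
    apply List.countP_congr
    intro e _
    simp [List.mem_append]
  rw [hcong]
  rw [countP_or_disjoint (fun e => decide (e.1 ∈ done)) (fun e => e.1 == u) (predsE es v)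
    (by
      intro e _ ⟨ha, hb⟩
      simp at ha hb
      exact hud (hb ▸ ha))]

theorem nodup_append_singleton (l : List Nat) (v : Nat) (h1 : l.Nodup) (h2 : v ∉ l) :
    (l ++ [v]).Nodup := by
  simp [List.nodup_append, h1]
  exact fun a ha hav => h2 (hav ▸ ha)

theorem getElem_not_mem_take (l : List Nat) (k : Nat) (hnd : l.Nodup) (h : k < l.length) :
    l[k] ∉ l.take k := by
  intro hmem
  have hdis := List.disjoint_take_drop hnd (le_refl k)
  exact hdis hmem (by rw [List.drop_eq_getElem_cons h]; exact List.mem_cons_self)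

theorem take_succ_getElem (l : List Nat) (k : Nat) (h : k < l.length) :
    l.take (k + 1) = l.take k ++ [l[k]] := by
  rw [List.take_add_one]
  simp [List.getElem?_eq_getElem h]

theorem innerB_main (cs : List Char) (es : List (Nat × Nat))
    (u : Nat) (done : List Nat) (hud : u ∉ done) (K : Nat) :
    ∀ (L X ordb : List Nat) (d : List Int),
      tgtsE es u = X ++ L →
      (∀ v ∈ L, v < cs.length) →
      K ≤ ordb.length →
      ordb.take K = done ++ [u] →
      ordb.Nodup →
      (∀ v ∈ ordb, v < cs.length) →
      (∀ v ∈ ordb, d.getD v 0 ≤ 0) →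
      d.length = cs.length →
      (∀ v, v < cs.length →
        d.getD v 0 = ((predsE es v).length : Int) - ((donePredsL es done v).length : Int) - (X.count v : Int)) →
      (∀ j, (hj : j < ordb.length) → ∀ e ∈ es, e.2 = ordb[j] → e.1 ∈ ordb.take (min j K)) →
      ordb <+: (L.foldl stepB (ordb, d)).1 ∧
      K ≤ (L.foldl stepB (ordb, d)).1.length ∧
      (L.foldl stepB (ordb, d)).1.take K = done ++ [u] ∧
      (L.foldl stepB (ordb, d)).1.Nodup ∧
      (∀ v ∈ (L.foldl stepB (ordb, d)).1, v < cs.length) ∧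
      (∀ v ∈ (L.foldl stepB (ordb, d)).1, (L.foldl stepB (ordb, d)).2.getD v 0 ≤ 0) ∧
      (L.foldl stepB (ordb, d)).2.length = cs.length ∧
      (∀ v, v < cs.length →
        (L.foldl stepB (ordb, d)).2.getD v 0
          = ((predsE es v).length : Int) - ((donePredsL es done v).length : Int) - (((X ++ L).count v : Nat) : Int)) ∧
      (∀ j, (hj : j < (L.foldl stepB (ordb, d)).1.length) → ∀ e ∈ es,
        e.2 = (L.foldl stepB (ordb, d)).1[j] → e.1 ∈ (L.foldl stepB (ordb, d)).1.take (min j K)) := by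
  intro L
  induction L with
  | nil =>
    intro X ordb d htg _ hK htk hnd hb hqd hdlen hdchar hclose
    simp only [List.foldl_nil]
    exact ⟨List.prefix_rfl, hK, htk, hnd, hb, hqd, hdlen,
      fun v hv => by rw [hdchar v hv, List.append_nil], hclose⟩
  | cons v0 t ih =>
    intro X ordb d htg hLb hK htk hnd hb hqd hdlen hdchar hclose
    have hv0n : v0 < cs.length := hLb v0 List.mem_cons_self
    have hv0d : v0 < d.length := by omega
    simp only [List.foldl_cons]
    have hsetself : (d.set v0 (d.getD v0 0 - 1)).getD v0 0 = d.getD v0 0 - 1 := by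
      simp [List.getD_eq_getElem?_getD, hv0d]
    have hsetne : ∀ w, w ≠ v0 → (d.set v0 (d.getD v0 0 - 1)).getD w 0 = d.getD w 0 := by
      intro w hw
      rw [List.getD_eq_getElem?_getD, List.getElem?_set_ne (fun hh => hw hh.symm),
        ← List.getD_eq_getElem?_getD]
    have htg' : tgtsE es u = (X ++ [v0]) ++ t := by rw [htg, List.append_assoc]; rfl
    have hLb' : ∀ v ∈ t, v < cs.length := fun v hv => hLb v (List.mem_cons_of_mem v0 hv)
    have hdlen' : (d.set v0 (d.getD v0 0 - 1)).length = cs.length := by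
      rw [List.length_set]; exact hdlen
    have hdchar' : ∀ v, v < cs.length →
        (d.set v0 (d.getD v0 0 - 1)).getD v 0
          = ((predsE es v).length : Int) - ((donePredsL es done v).length : Int)
            - (((X ++ [v0]).count v : Nat) : Int) := by
      intro v hv
      by_cases hvv : v = v0
      · subst hvv
        rw [hsetself, hdchar v hv, List.count_append]
        have h1 : List.count v [v] = 1 := by simp
        rw [h1]
        push_cast
        ring
      · rw [hsetne v hvv, hdchar v hv, List.count_append]
        have h1 : List.count v [v0] = 0 := by
          simp [List.count_cons]
          exact fun h => hvv h.symm
        rw [h1]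
        push_cast
        ring
    by_cases hz : d.getD v0 0 - 1 = 0
    · -- v0 is appended
      have hB : stepB (ordb, d) v0 = (ordb ++ [v0], d.set v0 (d.getD v0 0 - 1)) := by
        rw [stepB]
        dsimp only
        rw [if_pos hz]
      simp only [hB]
      have hv0notin : v0 ∉ ordb := by
        intro hmem
        have := hqd v0 hmem
        omega
      have hK' : K ≤ (ordb ++ [v0]).length := by
        rw [List.length_append]
        simp
        omega
      have htk' : (ordb ++ [v0]).take K = done ++ [u] := by
        rw [List.take_append_of_le_length hK]
        exact htk
      have hnd' : (ordb ++ [v0]).Nodup := nodup_append_singleton ordb v0 hnd hv0notin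
      have hb' : ∀ v ∈ ordb ++ [v0], v < cs.length := by
        intro v hv
        rcases List.mem_append.mp hv with h | h
        · exact hb v h
        · simp at h
          exact h ▸ hv0n
      have hqd' : ∀ v ∈ ordb ++ [v0], (d.set v0 (d.getD v0 0 - 1)).getD v 0 ≤ 0 := by
        intro v hv
        by_cases hvv : v = v0
        · subst hvv
          rw [hsetself]
          omega
        · rw [hsetne v hvv]
          rcases List.mem_append.mp hv with h | h
          · exact hqd v h
          · simp at h
            exact absurd h hvv
      have hclose' : ∀ j, (hj : j < (ordb ++ [v0]).length) → ∀ e ∈ es,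
          e.2 = (ordb ++ [v0])[j] → e.1 ∈ (ordb ++ [v0]).take (min j K) := by
        intro j hj e he hev
        rw [List.length_append, List.length_singleton] at hj
        by_cases hjo : j < ordb.length
        · rw [List.getElem_append_left hjo] at hev
          have hsub := hclose j hjo e he hev
          rw [List.take_append_of_le_length (by omega : min j K ≤ ordb.length)]
          exact hsub
        · have hje : j = ordb.length := by omega
          subst hje
          have hev0 : (ordb ++ [v0])[ordb.length] = v0 := by
            simp
          rw [hev0] at hev
          have hminK : min ordb.length K = K := by omega
          rw [hminK, List.take_append_of_le_length hK, htk]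
          -- counting argument: all predecessors of v0 lie in done ++ [u]
          have hcnt : d.getD v0 0 = ((predsE es v0).length : Int)
              - ((donePredsL es done v0).length : Int) - (X.count v0 : Int) := hdchar v0 hv0n
          have hXcnt : X.count v0 + 1 ≤ (tgtsE es u).count v0 := by
            rw [htg, List.count_append, List.count_cons]
            simp
          have hct := count_tgts es u v0
          have hDlen : (donePredsL es done v0).length
              = (predsE es v0).countP (fun e => decide (e.1 ∈ done)) := by
            rw [donePredsL, List.length_map, ← List.countP_eq_length_filter]
          have hUlen : ((predsE es v0).filter (fun e => e.1 == u)).length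
              = (predsE es v0).countP (fun e => e.1 == u) := by
            rw [← List.countP_eq_length_filter]
          have hdisj := countP_or_disjoint (fun e => decide (e.1 ∈ done)) (fun e => e.1 == u)
            (predsE es v0)
            (by
              intro x _ ⟨ha, hb2⟩
              simp at ha hb2
              exact hud (hb2 ▸ ha))
          have hle := List.countP_le_length
            (p := fun e => decide (e.1 ∈ done) || (e.1 == u)) (l := predsE es v0)
          have hall : ∀ e' ∈ predsE es v0, (decide (e'.1 ∈ done) || (e'.1 == u)) = true := by
            apply List.countP_eq_length.mp
            dsimp only at hdisj
            omega
          have hepreds : e ∈ predsE es v0 := by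
            rw [predsE, List.mem_filter]
            exact ⟨he, by simp [hev]⟩
          have := hall e hepreds
          simp at this
          rcases this with h | h
          · exact List.mem_append.mpr (Or.inl h)
          · exact List.mem_append.mpr (Or.inr (by simp [h]))
      obtain ⟨c1, c2, c3, c4, c5, c6, c7, c8, c9⟩ :=
        ih (X ++ [v0]) (ordb ++ [v0]) (d.set v0 (d.getD v0 0 - 1))
          htg' hLb' hK' htk' hnd' hb' hqd' hdlen' hdchar' hclose'
      refine ⟨List.IsPrefix.trans (List.prefix_append ordb [v0]) c1, c2, c3, c4, c5, c6, c7, ?_, c9⟩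
      intro v hv
      rw [c8 v hv, List.append_assoc]
      rfl
    · -- v0 is not appended
      have hB : stepB (ordb, d) v0 = (ordb, d.set v0 (d.getD v0 0 - 1)) := by
        rw [stepB]
        dsimp only
        rw [if_neg hz]
      simp only [hB]
      have hqd' : ∀ v ∈ ordb, (d.set v0 (d.getD v0 0 - 1)).getD v 0 ≤ 0 := by
        intro v hv
        by_cases hvv : v = v0
        · subst hvv
          rw [hsetself]
          have := hqd v hv
          omega
        · rw [hsetne v hvv]
          exact hqd v hv
      obtain ⟨c1, c2, c3, c4, c5, c6, c7, c8, c9⟩ :=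
        ih (X ++ [v0]) ordb (d.set v0 (d.getD v0 0 - 1))
          htg' hLb' hK htk hnd hb hqd' hdlen' hdchar' hclose
      refine ⟨c1, c2, c3, c4, c5, c6, c7, ?_, c9⟩
      intro v hv
      rw [c8 v hv, List.append_assoc]
      rfl

theorem vec_entry_pend (cs : List Char) (es : List (Nat × Nat)) (pg : List (List Nat))
    (done : List Nat) (u : Nat)
    (hPgu : pg.getD u [] = predsLst es u)
    (hpredsU : ∀ e ∈ es, e.2 = u → e.1 ∈ done) (i : Nat) (hi : i < 26) :
    (lpvVec cs (dpF cs pg done).1 (pg.getD u []) u).getD i 0 = pendCnt cs es pg done u i := by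
  obtain ⟨hl, hv⟩ := vec_spec cs (dpF cs pg done).1 (pg.getD u []) u
  rw [hv i hi, hPgu, pendCnt]
  have hdp : donePredsL es done u = predsLst es u := by
    rw [donePredsL, predsLst]
    congr 1
    apply List.filter_eq_self.mpr
    intro e he
    rw [predsE] at he
    obtain ⟨hees, heu⟩ := List.mem_filter.mp he
    simp at heu ⊢
    exact hpredsU e hees heu
  rw [hdp]
  simp only [fmax0, dpAt]

theorem pend_u_vec (cs : List Char) (es : List (Nat × Nat)) (pg : List (List Nat))
    (done : List Nat) (u : Nat) (hu : u < cs.length)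
    (hPgu : pg.getD u [] = predsLst es u)
    (hpredsU : ∀ e ∈ es, e.2 = u → e.1 ∈ done) (i : Nat) (hi : i < 26) :
    (dpAt cs pg (done ++ [u]) u).getD i 0 = pendCnt cs es pg done u i := by
  rw [dpAt_append_self cs pg done u hu]
  exact vec_entry_pend cs es pg done u hPgu hpredsU i hi

theorem pend_step_out (cs : List Char) (es : List (Nat × Nat)) (pg : List (List Nat))
    (done : List Nat) (u v i : Nat) (hud : u ∉ done) (hnotin : v ∉ tgtsE es u) :
    pendCnt cs es pg (done ++ [u]) v i = pendCnt cs es pg done v i := by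
  rw [pendCnt, pendCnt]
  congr 1
  have h1 : (predsE es v).filter (fun e => decide (e.1 ∈ done ++ [u]))
      = (predsE es v).filter (fun e => decide (e.1 ∈ done)) := by
    apply List.filter_congr
    intro e he
    rw [predsE] at he
    obtain ⟨hees, hev⟩ := List.mem_filter.mp he
    simp at hev
    have hne : e.1 ≠ u := by
      intro hh
      apply hnotin
      rw [tgtsE]
      exact List.mem_map.mpr ⟨e, List.mem_filter.mpr ⟨hees, by simp [hh]⟩, hev⟩
    simp [List.mem_append, hne]
  rw [donePredsL, donePredsL, h1]
  congr 1
  apply List.map_congr_left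
  intro p hp
  obtain ⟨e, hef, hep⟩ := List.mem_map.mp hp
  have hpd : p ∈ done := by
    have := (List.mem_filter.mp hef).2
    simp at this
    exact hep ▸ this
  have hpu : p ≠ u := fun hh => hud (hh ▸ hpd)
  rw [dpAt_append_ne cs pg done u p hpu]

theorem pend_step_in (cs : List Char) (es : List (Nat × Nat)) (pg : List (List Nat))
    (done : List Nat) (u v i : Nat) (hud : u ∉ done) (hin : v ∈ tgtsE es u)
    (hi : i < 26) (hu : u < cs.length)
    (hPgu : pg.getD u [] = predsLst es u)
    (hpredsU : ∀ e ∈ es, e.2 = u → e.1 ∈ done) :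
    pendCnt cs es pg (done ++ [u]) v i
      = max (pendCnt cs es pg done v i)
          (pendCnt cs es pg done u i + oneHot (lpvSlot (cs.getD v 'a')) i) := by
  have hfor : donePredsL es (done ++ [u]) v
      = ((predsE es v).filter (fun e => decide (e.1 ∈ done) || (e.1 == u))).map (fun e => e.1) := by
    rw [donePredsL]
    congr 1
    apply List.filter_congr
    intro e _
    rcases eq_or_ne e.1 u with h | h <;> simp [List.mem_append, h]
  have hex : ∃ e ∈ predsE es v, (e.1 == u) = true := by
    rw [tgtsE] at hin
    obtain ⟨e, hef, hev⟩ := List.mem_map.mp hin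
    obtain ⟨hees, heu⟩ := List.mem_filter.mp hef
    refine ⟨e, ?_, heu⟩
    rw [predsE, List.mem_filter]
    exact ⟨hees, by simp [hev]⟩
  have hQ : ∀ e ∈ predsE es v, (e.1 == u) = true →
      (fun e => (dpAt cs pg (done ++ [u]) e.1).getD i 0) e = (dpAt cs pg (done ++ [u]) u).getD i 0 := by
    intro e _ he
    simp at he
    dsimp only
    rw [he]
  rw [pendCnt, hfor, List.map_map, fmax0]
  rw [fmax_or (fun e => decide (e.1 ∈ done)) (fun e => e.1 == u)
    ((fun p => (dpAt cs pg (done ++ [u]) p).getD i 0) ∘ (fun e => e.1))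
    ((dpAt cs pg (done ++ [u]) u).getD i 0) (predsE es v) 0 hQ hex]
  have hmap : ((predsE es v).filter (fun e => decide (e.1 ∈ done))).map
        ((fun p => (dpAt cs pg (done ++ [u]) p).getD i 0) ∘ (fun e => e.1))
      = ((donePredsL es done v).map (fun p => (dpAt cs pg done p).getD i 0)) := by
    rw [donePredsL, List.map_map]
    apply List.map_congr_left
    intro e hef
    have hpd : e.1 ∈ done := by
      have := (List.mem_filter.mp hef).2
      simpa using this
    have hpu : e.1 ≠ u := fun hh => hud (hh ▸ hpd)
    simp only [Function.comp]
    rw [dpAt_append_ne cs pg done u e.1 hpu]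
  rw [hmap, pend_u_vec cs es pg done u hu hPgu hpredsU i hi]
  rw [pendCnt, pendCnt, fmax0, fmax0]
  omega

theorem take_subset_take (l : List Nat) (a b : Nat) (h : a ≤ b) : l.take a ⊆ l.take b := by
  intro x hx
  have heq : l.take a = (l.take b).take a := by
    rw [List.take_take, min_eq_left h]
  rw [heq] at hx
  exact List.take_subset _ _ hx

theorem loop_sim (cs : List Char) (es : List (Nat × Nat)) (graph pg : List (List Nat))
    (hes : ∀ e ∈ es, e.1 < cs.length ∧ e.2 < cs.length)
    (hG : ∀ u, u < cs.length → graph.getD u [] = tgtsE es u)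
    (hPg : ∀ v, v < cs.length → pg.getD v [] = predsLst es v) :
    ∀ (fuel k : Nat) (ord : List Nat) (d : List Int) (c : List (List Int)) (m : Int),
      cs.length ≤ fuel + k →
      k ≤ ord.length →
      ord.Nodup →
      (∀ v ∈ ord, v < cs.length) →
      (∀ j, (hj : j < ord.length) → ∀ e ∈ es, e.2 = ord[j] → e.1 ∈ ord.take (min j k)) →
      d.length = cs.length →
      (∀ v, v < cs.length → d.getD v 0
        = ((predsE es v).length : Int) - ((donePredsL es (ord.take k) v).length : Int)) →
      (∀ v ∈ ord, d.getD v 0 ≤ 0) →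
      c.length = cs.length →
      (∀ v, v < cs.length → (c.getD v []).length = 26 ∧
        ∀ i, i < 26 → (c.getD v []).getD i 0 = pendCnt cs es pg (ord.take k) v i) →
      m = bestAt cs pg (ord.take k) →
      (lpvPeelB graph fuel ord k d).Nodup ∧
      (∀ v ∈ lpvPeelB graph fuel ord k d, v < cs.length) ∧
      lpvLoopA cs graph fuel (ord.drop k) d c k m
        = ((lpvPeelB graph fuel ord k d).length, bestAt cs pg (lpvPeelB graph fuel ord k d)) := by
  intro fuel
  induction fuel with
  | zero =>
    intro k ord d c m hfuel hk hnd hb hclose hdlen hdchar hqd hclen hcrows hm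
    have hlen := nodup_lt_length_le ord cs.length hnd hb
    have hke : k = ord.length := by omega
    have hpeel : lpvPeelB graph 0 ord k d = ord := rfl
    have hloop : lpvLoopA cs graph 0 (ord.drop k) d c k m = (k, m) := rfl
    rw [hpeel, hloop, hm, hke, List.take_length]
    exact ⟨hnd, hb, rfl⟩
  | succ fuel ih =>
    intro k ord d c m hfuel hk hnd hb hclose hdlen hdchar hqd hclen hcrows hm
    by_cases hkl : k < ord.length
    · -- one more node is processed
      have hun : ord[k] ∈ ord := List.getElem_mem hkl
      have hul : ord[k] < cs.length := hb _ hun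
      have hGu : graph.getD ord[k] [] = tgtsE es ord[k] := hG _ hul
      have hdropk : ord.drop k = ord[k] :: ord.drop (k + 1) := List.drop_eq_getElem_cons hkl
      have hgetD : ord.getD k 0 = ord[k] := List.getD_eq_getElem ord 0 hkl
      rw [hdropk, loopA_cons, peelB_succ graph fuel ord k d hkl, hgetD, hGu]
      obtain ⟨hproj1, hproj2⟩ := innerB_proj cs ord[k] (tgtsE es ord[k]) (ord.drop (k + 1)) d c
        (ord.take (k + 1))
      rw [List.take_append_drop] at hproj1 hproj2
      have htake1 : ord.take (k + 1) = ord.take k ++ [ord[k]] := take_succ_getElem ord k hkl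
      have hud : ord[k] ∉ ord.take k := getElem_not_mem_take ord k hnd hkl
      have hLb : ∀ v ∈ tgtsE es ord[k], v < cs.length := by
        intro v hv
        rw [tgtsE] at hv
        obtain ⟨e, hef, hev⟩ := List.mem_map.mp hv
        exact hev ▸ (hes e (List.mem_filter.mp hef).1).2
      have hdchar0 : ∀ v, v < cs.length → d.getD v 0
          = ((predsE es v).length : Int) - ((donePredsL es (ord.take k) v).length : Int)
            - ((([] : List Nat).count v : Nat) : Int) := by
        intro v hv
        rw [hdchar v hv]
        simp
      have hcloseK : ∀ j, (hj : j < ord.length) → ∀ e ∈ es, e.2 = ord[j] →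
          e.1 ∈ ord.take (min j (k + 1)) := by
        intro j hj e he hev
        exact take_subset_take ord (min j k) (min j (k + 1)) (by omega) (hclose j hj e he hev)
      obtain ⟨m1, m2, m3, m4, m5, m6, m7, m8, m9⟩ :=
        innerB_main cs es ord[k] (ord.take k) hud (k + 1) (tgtsE es ord[k]) [] ord d
          (List.nil_append _).symm hLb (by omega) htake1 hnd hb hqd hdlen hdchar0 hcloseK
      rw [hproj2] at m6 m7 m8
      have hpredsU : ∀ e ∈ es, e.2 = ord[k] → e.1 ∈ ord.take k := by
        intro e he hev
        have := hclose k hkl e he hev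
        rwa [min_self] at this
      have hself : ord[k] ∉ tgtsE es ord[k] := by
        intro hmem
        rw [tgtsE] at hmem
        obtain ⟨e, hef, hev⟩ := List.mem_map.mp hmem
        obtain ⟨hees, heu⟩ := List.mem_filter.mp hef
        simp at heu
        have := hpredsU e hees hev
        rw [heu] at this
        exact hud this
      have hrowsL : ∀ w ∈ tgtsE es ord[k], (c.getD w []).length = 26 :=
        fun w hw => (hcrows w (hLb w hw)).1
      obtain ⟨hcL, hcV⟩ :=
        innerA_counts cs ord[k] (tgtsE es ord[k]) (ord.drop (k + 1)) d c hself hrowsL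
      obtain ⟨hdL, hdV⟩ := innerA_indeg cs ord[k] (tgtsE es ord[k]) (ord.drop (k + 1)) d c
      have htake' : ((tgtsE es ord[k]).foldl stepB (ord, d)).1.take (k + 1)
          = ord.take (k + 1) := by
        rw [m3, htake1]
      have hdrop' : ((tgtsE es ord[k]).foldl stepB (ord, d)).1.drop (k + 1)
          = ((tgtsE es ord[k]).foldl (stepA cs ord[k]) (ord.drop (k + 1), d, c)).1 := by
        rw [hproj1]
        exact List.drop_left' (by rw [List.length_take]; omega)
      have hcrows' : ∀ v, v < cs.length →
          (((tgtsE es ord[k]).foldl (stepA cs ord[k]) (ord.drop (k + 1), d, c)).2.2.getD v []).length = 26 ∧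
          ∀ i, i < 26 →
            (((tgtsE es ord[k]).foldl (stepA cs ord[k]) (ord.drop (k + 1), d, c)).2.2.getD v []).getD i 0
              = pendCnt cs es pg (((tgtsE es ord[k]).foldl stepB (ord, d)).1.take (k + 1)) v i := by
        intro v hv
        rw [htake', htake1, hcV v]
        by_cases hvt : v ∈ tgtsE es ord[k]
        · rw [if_pos hvt]
          obtain ⟨hrl, hrv⟩ := hcrows v hv
          obtain ⟨hul2, huv⟩ := hcrows ord[k] hul
          obtain ⟨rl2, rv2⟩ := relax_spec (c.getD ord[k] []) (c.getD v []) (lpvSlot (cs.getD v 'a')) hrl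
          refine ⟨rl2, ?_⟩
          intro i hi
          rw [rv2 i, if_pos hi, hrv i hi, huv i hi,
            pend_step_in cs es pg (ord.take k) ord[k] v i hud hvt hi hul (hPg _ hul) hpredsU]
        · rw [if_neg hvt]
          obtain ⟨hrl, hrv⟩ := hcrows v hv
          refine ⟨hrl, ?_⟩
          intro i hi
          rw [hrv i hi, pend_step_out cs es pg (ord.take k) ord[k] v i hud hvt]
      have hdchar' : ∀ v, v < cs.length →
          ((tgtsE es ord[k]).foldl (stepA cs ord[k]) (ord.drop (k + 1), d, c)).2.1.getD v 0
            = ((predsE es v).length : Int)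
              - ((donePredsL es ((((tgtsE es ord[k]).foldl stepB (ord, d)).1).take (k + 1)) v).length : Int) := by
        intro v hv
        rw [htake', htake1, m8 v hv, List.nil_append,
          donePreds_append_len es (ord.take k) ord[k] v hud, count_tgts es ord[k] v]
        push_cast
        ring
      have hrowu : ((tgtsE es ord[k]).foldl (stepA cs ord[k]) (ord.drop (k + 1), d, c)).2.2.getD ord[k] []
          = c.getD ord[k] [] := by
        rw [hcV ord[k], if_neg hself]
      have hrowvec : c.getD ord[k] []
          = lpvVec cs (dpF cs pg (ord.take k)).1 (pg.getD ord[k] []) ord[k] := by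
        obtain ⟨hul2, huv⟩ := hcrows ord[k] hul
        obtain ⟨vl, vv⟩ := vec_spec cs (dpF cs pg (ord.take k)).1 (pg.getD ord[k] []) ord[k]
        apply List.ext_getElem (by rw [hul2, vl])
        intro i h1 h2
        have hi : i < 26 := by rw [hul2] at h1; exact h1
        rw [← List.getD_eq_getElem _ 0 h1, ← List.getD_eq_getElem _ 0 h2, huv i hi,
          vec_entry_pend cs es pg (ord.take k) ord[k] (hPg _ hul) hpredsU i hi]
      have hm' : max m (pyMaxRow (((tgtsE es ord[k]).foldl (stepA cs ord[k]) (ord.drop (k + 1), d, c)).2.2.getD ord[k] []))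
          = bestAt cs pg (((tgtsE es ord[k]).foldl stepB (ord, d)).1.take (k + 1)) := by
        rw [htake', htake1, bestAt_append, hm, hrowu, hrowvec]
      have hrec := ih (k + 1) ((tgtsE es ord[k]).foldl stepB (ord, d)).1
        ((tgtsE es ord[k]).foldl (stepA cs ord[k]) (ord.drop (k + 1), d, c)).2.1
        ((tgtsE es ord[k]).foldl (stepA cs ord[k]) (ord.drop (k + 1), d, c)).2.2
        (max m (pyMaxRow (((tgtsE es ord[k]).foldl (stepA cs ord[k]) (ord.drop (k + 1), d, c)).2.2.getD ord[k] [])))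
        (by omega) m2 m4 m5 m9 m7 hdchar' m6 (by rw [hcL]; exact hclen) hcrows' hm'
      rw [hdrop'] at hrec
      rw [hproj2]
      exact hrec
    · -- the queue is exhausted
      have hke : k = ord.length := by omega
      have hdrop : ord.drop k = [] := by
        rw [hke, List.drop_length]
      have hloop : lpvLoopA cs graph (fuel + 1) [] d c k m = (k, m) := rfl
      rw [hdrop, hloop, peelB_stop graph fuel ord k d hkl, hm, hke, List.take_length]
      exact ⟨hnd, hb, rfl⟩

theorem foldl_pair_split {α β γ : Type} (f1 : α → γ → α) (f2 : β → γ → β) :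
    ∀ (l : List γ) (a : α) (b : β),
      l.foldl (fun st e => (f1 st.1 e, f2 st.2 e)) (a, b) = (l.foldl f1 a, l.foldl f2 b) := by
  intro l
  induction l with
  | nil => intro a b; rfl
  | cons x t ih => intro a b; simp only [List.foldl_cons]; exact ih (f1 a x) (f2 b x)

theorem getD_replicate_nil {α : Type} (n j : Nat) :
    (List.replicate n ([] : List α)).getD j [] = [] := by
  rw [List.getD_eq_getElem?_getD, List.getElem?_replicate]
  split <;> rfl

theorem getD_replicate_zero (n j : Nat) : (List.replicate n (0 : Int)).getD j 0 = 0 := by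
  rw [List.getD_eq_getElem?_getD, List.getElem?_replicate]
  split <;> rfl

-- ===== VERDICT (by name: the statement is the Claim_ definition above) =====
theorem largestPathValue_spec : Claim_equal_largestPathValue := by
  intro colors edges _ hpre
  obtain ⟨hlowB, hedgesB⟩ := hpre
  have hlow : ∀ c ∈ colors.toList, 97 ≤ c.toNat ∧ c.toNat ≤ 122 := by
    intro c hc
    have := List.all_eq_true.mp hlowB c hc
    simp only [Bool.and_eq_true, decide_eq_true_eq] at this
    exact this
  have hedges : ∀ e ∈ edges, 2 ≤ e.length ∧
      -(colors.toList.length : Int) ≤ e.getD 0 0 ∧ e.getD 0 0 < (colors.toList.length : Int) ∧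
      -(colors.toList.length : Int) ≤ e.getD 1 0 ∧ e.getD 1 0 < (colors.toList.length : Int) := by
    intro e he
    have := List.all_eq_true.mp hedgesB e he
    simp only [Bool.and_eq_true, decide_eq_true_eq] at this
    exact ⟨this.1.1.1.1, this.1.1.1.2, this.1.1.2, this.1.2, this.2⟩
  rw [Spec_largestPathValue, largestPathValue, largestPathValue_alt]
  simp only []
  -- notation
  have hes : ∀ e ∈ esOf colors.toList.length edges, e.1 < colors.toList.length ∧ e.2 < colors.toList.length := by
    intro e he
    rw [esOf] at he
    obtain ⟨e0, he0, rfl⟩ := List.mem_map.mp he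
    obtain ⟨_, h1, h2, h3, h4⟩ := hedges e0 he0
    constructor <;> simp only [lpvIdx] <;> split <;> omega
  have hslot : ∀ v, v < colors.toList.length → lpvSlot (colors.toList.getD v 'a') < 26 := by
    intro v hv
    have hmem : colors.toList.getD v 'a' ∈ colors.toList := by
      rw [List.getD_eq_getElem _ _ hv]
      exact List.getElem_mem hv
    have := hlow _ hmem
    rw [lpvSlot]
    omega
  -- the shared (graph, indegree) builder, characterised
  have hgi : edges.foldl
      (fun (st : List (List Nat) × List Int) e =>
        (st.1.set (lpvIdx colors.toList.length (e.getD 0 0))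
           ((st.1.getD (lpvIdx colors.toList.length (e.getD 0 0)) [])
             ++ [lpvIdx colors.toList.length (e.getD 1 0)]),
         st.2.set (lpvIdx colors.toList.length (e.getD 1 0))
           ((st.2.getD (lpvIdx colors.toList.length (e.getD 1 0)) 0) + 1)))
      (List.replicate colors.toList.length [], List.replicate colors.toList.length 0)
      = ((esOf colors.toList.length edges).foldl
          (fun g e => g.set e.1 ((g.getD e.1 []) ++ [e.2])) (List.replicate colors.toList.length []),
         (esOf colors.toList.length edges).foldl
          (fun g e => g.set e.2 ((g.getD e.2 0) + 1)) (List.replicate colors.toList.length 0)) := by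
    rw [← foldl_pair_split (fun (g : List (List Nat)) (e : Nat × Nat) => g.set e.1 ((g.getD e.1 []) ++ [e.2]))
      (fun (g : List Int) (e : Nat × Nat) => g.set e.2 ((g.getD e.2 0) + 1)), esOf, List.foldl_map]
  obtain ⟨hgL, hgV⟩ := build_append_spec (fun e => e.1) (fun e => e.2) (esOf colors.toList.length edges)
    (List.replicate colors.toList.length []) (by intro e he; rw [List.length_replicate]; exact (hes e he).1)
  obtain ⟨hiL, hiV⟩ := build_count_spec (esOf colors.toList.length edges) (List.replicate colors.toList.length 0)
    (by intro e he; rw [List.length_replicate]; exact (hes e he).2)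
  have hGr : ∀ u, u < colors.toList.length →
      ((esOf colors.toList.length edges).foldl (fun g e => g.set e.1 ((g.getD e.1 []) ++ [e.2]))
        (List.replicate colors.toList.length [])).getD u [] = tgtsE (esOf colors.toList.length edges) u := by
    intro u _
    rw [hgV u, getD_replicate_nil, List.nil_append, tgtsE]
  have hIr : ∀ v, ((esOf colors.toList.length edges).foldl (fun g e => g.set e.2 ((g.getD e.2 0) + 1))
      (List.replicate colors.toList.length 0)).getD v 0 = ((predsE (esOf colors.toList.length edges) v).length : Int) := by
    intro v
    rw [hiV v, getD_replicate_zero, zero_add]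
  -- predecessor lists of B, characterised
  have hpg : edges.foldl
      (fun (pg : List (List Nat)) e =>
        pg.set (lpvIdx colors.toList.length (e.getD 1 0))
          ((pg.getD (lpvIdx colors.toList.length (e.getD 1 0)) [])
            ++ [lpvIdx colors.toList.length (e.getD 0 0)]))
      (List.replicate colors.toList.length [])
      = (esOf colors.toList.length edges).foldl (fun g e => g.set e.2 ((g.getD e.2 []) ++ [e.1]))
          (List.replicate colors.toList.length []) := by
    rw [esOf, List.foldl_map]
  obtain ⟨hpL, hpV⟩ := build_append_spec (fun e => e.2) (fun e => e.1) (esOf colors.toList.length edges)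
    (List.replicate colors.toList.length []) (by intro e he; rw [List.length_replicate]; exact (hes e he).2)
  have hPr : ∀ v, v < colors.toList.length →
      ((esOf colors.toList.length edges).foldl (fun g e => g.set e.2 ((g.getD e.2 []) ++ [e.1]))
        (List.replicate colors.toList.length [])).getD v [] = predsLst (esOf colors.toList.length edges) v := by
    intro v _
    rw [hpV v, getD_replicate_nil, List.nil_append, predsLst, predsE]
  -- initial counts, characterised
  have hcnt := foldl_idx ([] : List Int)
    (fun cts i => cts.set i ((cts.getD i []).set (lpvSlot (colors.toList.getD i 'a'))
      (((cts.getD i []).getD (lpvSlot (colors.toList.getD i 'a')) 0) + 1)))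
    (fun i row => row.set (lpvSlot (colors.toList.getD i 'a'))
      ((row.getD (lpvSlot (colors.toList.getD i 'a')) 0) + 1))
    (fun r i => by simp)
    (fun r i j hj => by
      by_cases hji : j = i
      · subst hji
        rw [if_pos rfl]
        simp [List.getD_eq_getElem?_getD, hj]
      · rw [if_neg hji]
        simp [List.getD_eq_getElem?_getD, List.getElem?_set_ne (fun hh => hji hh.symm)])
    colors.toList.length (List.replicate colors.toList.length (List.replicate 26 0))
    (by rw [List.length_replicate])
  obtain ⟨hcL, hcV⟩ := hcnt
  set cts0 : List (List Int) := (List.range colors.toList.length).foldl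
    (fun (cts : List (List Int)) i => cts.set i ((cts.getD i []).set (lpvSlot (colors.toList.getD i 'a'))
      (((cts.getD i []).getD (lpvSlot (colors.toList.getD i 'a')) 0) + 1)))
    (List.replicate colors.toList.length (List.replicate 26 (0:Int))) with hcts0
  have hrep26 : ∀ v, v < colors.toList.length →
      (List.replicate colors.toList.length (List.replicate 26 (0:Int))).getD v [] = List.replicate 26 0 := by
    intro v hv
    rw [List.getD_eq_getElem?_getD, List.getElem?_replicate, if_pos hv, Option.getD_some]
  have hrep26' : ∀ j, (List.replicate 26 (0:Int)).getD j 0 = 0 := by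
    intro j
    rw [List.getD_eq_getElem?_getD, List.getElem?_replicate]
    split <;> rfl
  have hcrows0 : ∀ v, v < colors.toList.length → ((cts0.getD v []).length = 26 ∧
      ∀ i, i < 26 → (cts0.getD v []).getD i 0
        = pendCnt colors.toList (esOf colors.toList.length edges)
            ((esOf colors.toList.length edges).foldl (fun g e => g.set e.2 ((g.getD e.2 []) ++ [e.1]))
              (List.replicate colors.toList.length [])) [] v i) := by
    intro v hv
    have hdonE : donePredsL (esOf colors.toList.length edges) [] v = [] := by
      rw [donePredsL]
      simp
    have hpend : ∀ i, pendCnt colors.toList (esOf colors.toList.length edges)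
        ((esOf colors.toList.length edges).foldl (fun g e => g.set e.2 ((g.getD e.2 []) ++ [e.1]))
          (List.replicate colors.toList.length [])) [] v i
        = oneHot (lpvSlot (colors.toList.getD v 'a')) i := by
      intro i
      rw [pendCnt, hdonE]
      simp [fmax0]
    rw [hcts0, hcV v, if_pos hv, hrep26 v hv]
    constructor
    · simp
    · intro i hi
      rw [hpend i]
      by_cases his : i = lpvSlot (colors.toList.getD v 'a')
      · subst his
        rw [List.getD_eq_getElem?_getD, List.getElem?_set_self (by rw [List.length_replicate]; exact hslot v hv),
          Option.getD_some, hrep26', oneHot, if_pos rfl]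
        omega
      · rw [List.getD_eq_getElem?_getD, List.getElem?_set_ne (fun hh => his hh.symm),
          ← List.getD_eq_getElem?_getD, hrep26', oneHot, if_neg (fun hh => his hh.symm)]
  -- initial queue facts
  set iD : List Int := (esOf colors.toList.length edges).foldl (fun (g : List Int) e => g.set e.2 ((g.getD e.2 0) + 1))
    (List.replicate colors.toList.length (0:Int)) with hiD
  set ord0 := (List.range colors.toList.length).filter (fun i => iD.getD i 0 == 0) with hord0
  have hnd0 : ord0.Nodup := (List.nodup_range).filter _
  have hb0 : ∀ v ∈ ord0, v < colors.toList.length := by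
    intro v hv
    have := (List.mem_filter.mp hv).1
    exact List.mem_range.mp this
  have hqd0 : ∀ v ∈ ord0, iD.getD v 0 ≤ 0 := by
    intro v hv
    have := (List.mem_filter.mp hv).2
    rw [beq_iff_eq] at this
    omega
  have hclose0 : ∀ j, (hj : j < ord0.length) → ∀ e ∈ esOf colors.toList.length edges, e.2 = ord0[j] →
      e.1 ∈ ord0.take (min j 0) := by
    intro j hj e he hev
    have hmem : ord0[j] ∈ ord0 := List.getElem_mem hj
    have hz := (List.mem_filter.mp hmem).2
    rw [beq_iff_eq] at hz
    rw [hIr] at hz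
    have hlen0 : (predsE (esOf colors.toList.length edges) ord0[j]).length = 0 := by exact_mod_cast hz
    have hnil : predsE (esOf colors.toList.length edges) ord0[j] = [] := List.length_eq_zero_iff.mp hlen0
    have : e ∈ predsE (esOf colors.toList.length edges) ord0[j] := by
      rw [predsE, List.mem_filter]
      exact ⟨he, by simp [hev]⟩
    rw [hnil] at this
    exact absurd this (List.not_mem_nil)
  have hdchar0 : ∀ v, v < colors.toList.length → iD.getD v 0
      = ((predsE (esOf colors.toList.length edges) v).length : Int)
        - ((donePredsL (esOf colors.toList.length edges) (ord0.take 0) v).length : Int) := by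
    intro v _
    rw [hIr v, List.take_zero]
    have : donePredsL (esOf colors.toList.length edges) [] v = [] := by rw [donePredsL]; simp
    rw [this]
    simp
  -- the simulation
  have hsim := loop_sim colors.toList (esOf colors.toList.length edges)
    ((esOf colors.toList.length edges).foldl (fun g e => g.set e.1 ((g.getD e.1 []) ++ [e.2]))
      (List.replicate colors.toList.length []))
    ((esOf colors.toList.length edges).foldl (fun g e => g.set e.2 ((g.getD e.2 []) ++ [e.1]))
      (List.replicate colors.toList.length []))
    hes hGr hPr (2 * colors.toList.length + 1) 0 ord0 iD cts0 0
    (by omega) (Nat.zero_le _) hnd0 hb0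
    (by intro j hj e he hev; exact hclose0 j hj e he hev)
    (by rw [hiD, hiL, List.length_replicate]) hdchar0 hqd0
    (by rw [hcts0, hcL, List.length_replicate]) hcrows0
    (by rw [List.take_zero]; rfl)
  obtain ⟨hndF, hbF, heqF⟩ := hsim
  rw [List.drop_zero] at heqF
  rw [hgi, hpg]
  dsimp only
  rw [← hord0, heqF]
  have hlenF := nodup_lt_length_le _ colors.toList.length hndF hbF
  by_cases hfull : (lpvPeelB ((esOf colors.toList.length edges).foldl (fun g e => g.set e.1 ((g.getD e.1 []) ++ [e.2]))
      (List.replicate colors.toList.length [])) (2 * colors.toList.length + 1) ord0 0 iD).length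
      = colors.toList.length
  · rw [if_pos hfull, if_neg (by omega)]
    rfl
  · rw [if_neg hfull, if_pos (by omega)]
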